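-- pv_equiv track=rewrite | github.com/ToxicHost/Forge-Studio | scripts/studio_workshop.py | get_block_list
-- ===== SOURCE A (Python) =====
-- def get_block_list(arch: str) -> list:
--     """Return ordered list of block group names for an architecture."""
--     if arch == "sd15":
--         return (["BASE"] +
--                 [f"IN{i:02d}" for i in range(12)] +
--                 ["M00"] +
--                 [f"OUT{i:02d}" for i in range(12)])
--     elif arch == "sdxl":
--         return (["BASE"] +
--                 [f"IN{i:02d}" for i in range(9)] +
--                 ["M00"] +
--                 [f"OUT{i:02d}" for i in range(9)])
--     elif arch == "sd3":
--         return [f"J{i:02d}" for i in range(38)]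
--     elif arch == "flux1":
--         return ([f"D{i:02d}" for i in range(19)] +
--                 [f"S{i:02d}" for i in range(38)])
--     elif arch == "flux2":
--         return ([f"D{i:02d}" for i in range(8)] +
--                 [f"S{i:02d}" for i in range(48)])
--     elif arch == "cosmos":
--         return [f"B{i:02d}" for i in range(28)]
--     return []
-- ===== SOURCE B (Python) =====
-- ARCH_SPEC = {
--     "sd15": [("BASE", None), ("IN", 12), ("M00", None), ("OUT", 12)],
--     "sdxl": [("BASE", None), ("IN", 9), ("M00", None), ("OUT", 9)],
--     "sd3": [("J", 38)],
--     "flux1": [("D", 19), ("S", 38)],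
--     "flux2": [("D", 8), ("S", 48)],
--     "cosmos": [("B", 28)],
-- }
--
--
-- def get_block_list(arch: str) -> list:
--     """Return ordered list of block group names for an architecture."""
--     names = []
--     for prefix, count in ARCH_SPEC.get(arch, []):
--         if count is None:
--             names.append(prefix)
--         else:
--             names.extend(f"{prefix}{i:02d}" for i in range(count))
--     return names
-- ===== Notes on version B (the rewrite author's own statement) =====
-- stated objective: simpler
-- what changed: Replaced the six inline if/elif branches building hard-coded concatenations with one ARCH_SPEC data table of (prefix, count) segment descriptors plus a single generic expansion loop.
import Mathlib
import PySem

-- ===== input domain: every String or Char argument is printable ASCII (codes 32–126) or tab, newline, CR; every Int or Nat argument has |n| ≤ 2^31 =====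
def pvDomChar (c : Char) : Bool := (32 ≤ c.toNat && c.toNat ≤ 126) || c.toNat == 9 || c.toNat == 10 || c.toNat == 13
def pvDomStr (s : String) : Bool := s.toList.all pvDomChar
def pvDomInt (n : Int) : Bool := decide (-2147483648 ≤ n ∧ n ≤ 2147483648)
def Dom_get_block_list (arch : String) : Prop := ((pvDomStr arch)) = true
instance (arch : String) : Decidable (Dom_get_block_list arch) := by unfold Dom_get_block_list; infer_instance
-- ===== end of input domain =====

-- B replaces A's six hard-coded if/elif branches with a data table of (prefix, count)
-- segments and one generic expansion loop (objective: simpler).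

-- f"{pre}{i:02d}" for 0 ≤ i: prefix ++ str(i) zero-padded to width 2 (exact on the counts used here)
def pvFmt2 (pre : String) (i : Int) : String := pre ++ PySem.Str.zfill (PySem.Int.toStr i) 2

-- ===== PORT A =====
def get_block_list (arch : String) : List String :=
  if arch == "sd15" then
    ["BASE"] ++ (PySem.List.pyRange 0 12 1).map (pvFmt2 "IN")
      ++ ["M00"] ++ (PySem.List.pyRange 0 12 1).map (pvFmt2 "OUT")
  else if arch == "sdxl" then
    ["BASE"] ++ (PySem.List.pyRange 0 9 1).map (pvFmt2 "IN")
      ++ ["M00"] ++ (PySem.List.pyRange 0 9 1).map (pvFmt2 "OUT")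
  else if arch == "sd3" then
    (PySem.List.pyRange 0 38 1).map (pvFmt2 "J")
  else if arch == "flux1" then
    (PySem.List.pyRange 0 19 1).map (pvFmt2 "D") ++ (PySem.List.pyRange 0 38 1).map (pvFmt2 "S")
  else if arch == "flux2" then
    (PySem.List.pyRange 0 8 1).map (pvFmt2 "D") ++ (PySem.List.pyRange 0 48 1).map (pvFmt2 "S")
  else if arch == "cosmos" then
    (PySem.List.pyRange 0 28 1).map (pvFmt2 "B")
  else []

-- ===== PORT B =====
def pvArchSpec : PySem.Dict String (List (String × Option Int)) :=
  PySem.Dict.ofList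
    [ ("sd15",   [("BASE", none), ("IN", some 12), ("M00", none), ("OUT", some 12)])
    , ("sdxl",   [("BASE", none), ("IN", some 9),  ("M00", none), ("OUT", some 9)])
    , ("sd3",    [("J", some 38)])
    , ("flux1",  [("D", some 19), ("S", some 38)])
    , ("flux2",  [("D", some 8),  ("S", some 48)])
    , ("cosmos", [("B", some 28)]) ]

def pvExpandSeg (names : List String) (seg : String × Option Int) : List String :=
  match seg.2 with
  | none => names ++ [seg.1]
  | some n => names ++ (PySem.List.pyRange 0 n 1).map (pvFmt2 seg.1)

def get_block_list_alt (arch : String) : List String :=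
  (PySem.Dict.getD pvArchSpec arch []).foldl pvExpandSeg []

-- ===== PRECONDITION & SPEC =====
def Spec_get_block_list (arch : String) (out : List String) : Prop := out = get_block_list_alt arch
instance (arch : String) (out : List String) : Decidable (Spec_get_block_list arch out) := by unfold Spec_get_block_list; infer_instance

-- ===== CLAIM (what is proved, stated in full; the proofs are below) =====
def Claim_equal_get_block_list : Prop := ∀ (arch : String), Dom_get_block_list arch → Spec_get_block_list arch (get_block_list arch)

-- ===== LEMMAS AND PROOFS =====

-- ===== VERDICT (by name: the statement is the Claim_ definition above) =====
theorem get_block_list_spec : Claim_equal_get_block_list := by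
  intro arch _
  unfold Spec_get_block_list get_block_list get_block_list_alt
  by_cases h1 : arch = "sd15"
  · subst h1; decide
  · by_cases h2 : arch = "sdxl"
    · subst h2; decide
    · by_cases h3 : arch = "sd3"
      · subst h3; decide
      · by_cases h4 : arch = "flux1"
        · subst h4; decide
        · by_cases h5 : arch = "flux2"
          · subst h5; decide
          · by_cases h6 : arch = "cosmos"
            · subst h6; decide
            · have hd : pvArchSpec = PySem.Dict.mk
                  [ ("sd15",   [("BASE", none), ("IN", some 12), ("M00", none), ("OUT", some 12)])
                  , ("sdxl",   [("BASE", none), ("IN", some 9),  ("M00", none), ("OUT", some 9)])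
                  , ("sd3",    [("J", some 38)])
                  , ("flux1",  [("D", some 19), ("S", some 38)])
                  , ("flux2",  [("D", some 8),  ("S", some 48)])
                  , ("cosmos", [("B", some 28)]) ] := by decide
              rw [hd]
              simp [h1, h2, h3, h4, h5, h6, PySem.Dict.getD, PySem.Dict.get?, beq_iff_eq,
                    Ne.symm h1, Ne.symm h2, Ne.symm h3, Ne.symm h4, Ne.symm h5, Ne.symm h6]
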